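-- pv_equiv track=rewrite | github.com/A-D-Alamdari/The_Python_WorkBook | Part8_RecursionExercises/Exercise_171.py | can_spell
-- ===== SOURCE A (Python) =====
-- def can_spell(word, symbols):
--     word = word.lower()  # Convert the word to lowercase for case-insensitive comparison
--     if word == '':
--         return True, ''
--     for symbol in symbols:
--         if word.startswith(symbol.lower()):
--             success, spelling = can_spell(word[len(symbol):], symbols)
--             if success:
--                 return True, symbol + spelling
--     return False, ''
-- ===== SOURCE B (Python) =====
-- def can_spell(word, symbols):
--     # Bottom-up DP over suffix start index: best[i] is the result for word[i:].
--     w = word.lower()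
--     n = len(w)
--     syms = [(s, s.lower()) for s in symbols if s]  # empty symbols spell nothing
--     best = [(True, '')] * (n + 1)
--     for i in range(n - 1, -1, -1):
--         res = (False, '')
--         for s, low in syms:
--             if w[i:i + len(low)] == low:
--                 ok, sp = best[i + len(s)]
--                 if ok:
--                     res = (True, s + sp)
--                     break
--         best[i] = res
--     return best[0]
-- ===== Notes on version B (the rewrite author's own statement) =====
-- stated objective: faster
-- what changed: Replaced A's exponential backtracking recursion over suffixes with a bottom-up dynamic program that fills a table best[i] for each suffix start index, trying symbols in the same order, so each suffix is solved once.
-- outside the precondition, e.g. on can_spell('ab', ['ab', '']): A returns (True, 'ab'), B returns (True, 'ab')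
import Mathlib
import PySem

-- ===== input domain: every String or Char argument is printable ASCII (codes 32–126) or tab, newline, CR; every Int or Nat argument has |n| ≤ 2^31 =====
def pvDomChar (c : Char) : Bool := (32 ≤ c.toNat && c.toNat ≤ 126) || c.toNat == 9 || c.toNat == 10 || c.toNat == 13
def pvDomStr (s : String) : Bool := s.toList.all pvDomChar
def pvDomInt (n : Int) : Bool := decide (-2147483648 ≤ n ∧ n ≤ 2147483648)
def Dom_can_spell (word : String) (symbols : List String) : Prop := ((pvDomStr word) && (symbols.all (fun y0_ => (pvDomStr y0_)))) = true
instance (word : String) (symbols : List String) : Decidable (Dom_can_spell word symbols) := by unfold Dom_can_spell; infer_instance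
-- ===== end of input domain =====

-- B replaces A's backtracking recursion over suffixes by a bottom-up DP table over suffix start indices.

-- ===== PORT A =====
-- the `for symbol in symbols` loop of A, with the recursive call abstracted as `rec`
def canSpellLoop (rec : String → Bool × String) (w : String) : List String → Bool × String
  | [] => (false, "")
  | s :: rest =>
    if PySem.Str.startswith w (PySem.Str.lower s) then
      let r := rec (PySem.Str.slice w (some (PySem.Str.len s)) none)
      if r.1 then (true, s ++ r.2) else canSpellLoop rec w rest
    else canSpellLoop rec w rest

-- fuel-guarded transcription of A's recursion; the fuel only makes the recursion total:
-- len(word)+1 fuel suffices on every input admitted by Pre_ (each recursive call strictly shortens the word)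
def canSpellFuel : Nat → String → List String → Bool × String
  | 0, _, _ => (false, "")
  | fuel+1, word, symbols =>
    let w := PySem.Str.lower word
    if w = "" then (true, "")
    else canSpellLoop (fun suf => canSpellFuel fuel suf symbols) w symbols

def can_spell (word : String) (symbols : List String) : Bool × String :=
  canSpellFuel (word.toList.length + 1) word symbols

-- ===== PORT B =====
-- the inner `for s, low in syms` loop of Source B, reading already-computed table entries
def canSpellAltLoop (w : String) (best : Array (Bool × String)) (i : Nat) :
    List (String × String) → Bool × String
  | [] => (false, "")
  | (s, low) :: rest =>
    if PySem.Str.slice w (some (i : Int)) (some ((i : Int) + PySem.Str.len low)) = low then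
      let r := best.getD (i + s.toList.length) (false, "")
      if r.1 then (true, s ++ r.2) else canSpellAltLoop w best i rest
    else canSpellAltLoop w best i rest

def can_spell_alt (word : String) (symbols : List String) : Bool × String :=
  let w := PySem.Str.lower word
  let n := w.toList.length
  let syms := (symbols.filter (fun s => s ≠ "")).map (fun s => (s, PySem.Str.lower s))
  let best := ((List.range n).reverse).foldl
      (fun a i => a.set! i (canSpellAltLoop w a i syms)) (Array.replicate (n+1) (true, ""))
  best.getD 0 (true, "")

-- ===== PRECONDITION & SPEC =====
-- Pre_ excludes nonempty words with the empty string among the symbols: there A's recursion can call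
-- itself on an unchanged word and overflow the stack (RecursionError); A does still return on some
-- such inputs (when a spelling is found before the empty symbol is ever tried), see the cite in claim.json.
def Pre_can_spell (word : String) (symbols : List String) : Prop := word = "" ∨ "" ∉ symbols
instance (word : String) (symbols : List String) : Decidable (Pre_can_spell word symbols) := by
  unfold Pre_can_spell; infer_instance
def pvWitness_can_spell : String × List String := ("To", ["t", "O"])
def Spec_can_spell (word : String) (symbols : List String) (out : Bool × String) : Prop := out = can_spell_alt word symbols
instance (word : String) (symbols : List String) (out : Bool × String) : Decidable (Spec_can_spell word symbols out) := by unfold Spec_can_spell; infer_instance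

-- ===== CLAIM (what is proved, stated in full; the proofs are below) =====
def Claim_equal_can_spell : Prop := ∀ (word : String) (symbols : List String), Dom_can_spell word symbols → Pre_can_spell word symbols → Spec_can_spell word symbols (can_spell word symbols)

-- ===== LEMMAS AND PROOFS =====

theorem lowerChar_idem (c : Char) :
    PySem.Chars.lowerChar (PySem.Chars.lowerChar c) = PySem.Chars.lowerChar c := by
  simp only [PySem.Chars.lowerChar, PySem.Chars.isupper]
  split_ifs with h1 h2 <;> try rfl
  exfalso
  simp only [Bool.and_eq_true, decide_eq_true_eq, Char.le_def, UInt32.le_iff_toNat_le] at h1 h2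
  have hA : ('A' : Char).val.toNat = 65 := by decide
  have hZ : ('Z' : Char).val.toNat = 90 := by decide
  rw [hA, hZ] at h1 h2
  have hv : ((c.toNat) + 32).isValidChar := by
    constructor; simp only [Char.toNat] at *; omega
  have ht : (Char.ofNat (c.toNat + 32)).toNat = c.toNat + 32 := by
    rw [Char.toNat_ofNat, if_pos hv]
  simp only [Char.toNat] at *
  omega

theorem chars_lower_idem (l : List Char) :
    PySem.Chars.lower (PySem.Chars.lower l) = PySem.Chars.lower l := by
  simp [PySem.Chars.lower, List.map_map, Function.comp_def, lowerChar_idem]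

theorem length_lower (s : String) :
    (PySem.Str.lower s).toList.length = s.toList.length := by
  simp [PySem.Str.toList_lower, PySem.Chars.lower]

theorem toList_sliceFrom (w : String) (s : String) :
    (PySem.Str.slice w (some (PySem.Str.len s)) none).toList = w.toList.drop s.toList.length := by
  simp [PySem.Str.toList_slice, PySem.Str.len, PySem.List.slice_from_natCast]

-- canSpellFuel only depends on the lowered word
theorem fuel_congr_lower (f : Nat) (u v : String) (symbols : List String)
    (h : PySem.Str.lower u = PySem.Str.lower v) :
    canSpellFuel f u symbols = canSpellFuel f v symbols := by
  cases f with
  | zero => rfl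
  | succ f => simp only [canSpellFuel, h]

theorem loop_congr (r1 r2 : String → Bool × String) (w : String) (l : List String)
    (h : ∀ s ∈ l, r1 (PySem.Str.slice w (some (PySem.Str.len s)) none)
                = r2 (PySem.Str.slice w (some (PySem.Str.len s)) none)) :
    canSpellLoop r1 w l = canSpellLoop r2 w l := by
  induction l with
  | nil => rfl
  | cons s rest ih =>
    have hs := h s (List.mem_cons_self)
    have hr := ih (fun t ht => h t (List.mem_cons_of_mem _ ht))
    simp only [canSpellLoop, hs, hr]

-- fuel irrelevance: any fuel exceeding the word length gives the same value (symbols nonempty)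
theorem fuel_eq (f1 : Nat) : ∀ (f2 : Nat) (u : String) (symbols : List String),
    (∀ s ∈ symbols, s ≠ "") → u.toList.length < f1 → u.toList.length < f2 →
    canSpellFuel f1 u symbols = canSpellFuel f2 u symbols := by
  induction f1 with
  | zero => intro f2 u symbols _ h1 _; omega
  | succ f1 ih =>
    intro f2 u symbols hsym h1 h2
    cases f2 with
    | zero => omega
    | succ f2 =>
      simp only [canSpellFuel]
      split_ifs with hw
      · rfl
      · apply loop_congr
        intro s hs
        have hslen : 1 ≤ s.toList.length := by
          have := hsym s hs
          have : s.toList ≠ [] := fun h => this (by rw [← String.toList_inj]; simpa using h)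
          cases hl : s.toList with
          | nil => exact absurd hl this
          | cons a t => simp
        have hwlen : 1 ≤ (PySem.Str.lower u).toList.length := by
          have : (PySem.Str.lower u).toList ≠ [] := fun h => hw (by rw [← String.toList_inj]; simpa using h)
          cases hl : (PySem.Str.lower u).toList with
          | nil => exact absurd hl this
          | cons a t => simp
        have hx : (PySem.Str.slice (PySem.Str.lower u) (some (PySem.Str.len s)) none).toList.length
            = (PySem.Str.lower u).toList.length - s.toList.length := by
          rw [toList_sliceFrom]; simp
        have hlu := length_lower u
        apply ih
        · exact hsym
        · omega
        · omega

-- the A-side value of the suffix starting at j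
def suffVal (wl : List Char) (symbols : List String) (j : Nat) : Bool × String :=
  canSpellFuel (wl.length - j + 1) (String.ofList (wl.drop j)) symbols

-- the two inner loops agree, given correct table entries above j
theorem loops_agree (wl : List Char) (symbols : List String) (a : Array (Bool × String))
    (j : Nat) (hj : j < wl.length)
    (hsym : ∀ s ∈ symbols, s ≠ "")
    (hInv : ∀ m, j < m → m ≤ wl.length → a.getD m (false, "") = suffVal wl symbols m) :
    ∀ l, (∀ s ∈ l, s ≠ "") →
    canSpellAltLoop (String.ofList wl) a j (l.map (fun s => (s, PySem.Str.lower s)))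
      = canSpellLoop (fun suf => canSpellFuel (wl.length - j) suf symbols)
          (String.ofList (wl.drop j)) l := by
  intro l hl
  induction l with
  | nil => rfl
  | cons s rest ih =>
    have hs : s ≠ "" := hl s List.mem_cons_self
    have hslen : 1 ≤ s.toList.length := by
      have : s.toList ≠ [] := fun h => hs (by rw [← String.toList_inj]; simpa using h)
      cases hc : s.toList with
      | nil => exact absurd hc this
      | cons x t => simp
    have hllen : (PySem.Str.lower s).toList.length = s.toList.length := length_lower s
    have hcond : (PySem.Str.slice (String.ofList wl) (some (j : Int))
          (some ((j : Int) + PySem.Str.len (PySem.Str.lower s))) = PySem.Str.lower s)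
        ↔ (PySem.Str.startswith (String.ofList (wl.drop j)) (PySem.Str.lower s) = true) := by
      rw [← String.toList_inj]
      rw [PySem.Str.toList_slice]
      simp only [PySem.Chars.slice_eq_listSlice, PySem.Str.len, String.toList_ofList]
      rw [show ((j:Int) + ((PySem.Str.lower s).toList.length : Int))
            = ((j:Nat):Int) + (((PySem.Str.lower s).toList.length : Nat):Int) by push_cast; ring]
      rw [PySem.List.slice_natCast_add]
      rw [PySem.Str.startswith_eq]
      rw [PySem.Chars.startswith_iff]
      simp only [String.toList_ofList]
      rw [List.prefix_iff_eq_take]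
      exact ⟨Eq.symm, Eq.symm⟩
    by_cases hc : PySem.Str.startswith (String.ofList (wl.drop j)) (PySem.Str.lower s) = true
    · have hpre : (PySem.Str.lower s).toList <+: wl.drop j := by
        rw [PySem.Str.startswith_eq, PySem.Chars.startswith_iff] at hc
        simpa using hc
      have hle : s.toList.length ≤ wl.length - j := by
        have := hpre.length_le
        simp only [List.length_drop] at this
        omega
      have hidx : j + s.toList.length ≤ wl.length := by omega
      have harg : (PySem.Str.slice (String.ofList (wl.drop j)) (some (PySem.Str.len s)) none)
          = String.ofList (wl.drop (j + s.toList.length)) := by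
        rw [← String.toList_inj, toList_sliceFrom]
        simp [List.drop_drop]
      have hget : a.getD (j + s.toList.length) (false, "") = suffVal wl symbols (j + s.toList.length) :=
        hInv _ (by omega) hidx
      have hfuel : canSpellFuel (wl.length - j) (String.ofList (wl.drop (j + s.toList.length))) symbols
          = suffVal wl symbols (j + s.toList.length) := by
        unfold suffVal
        apply fuel_eq <;> try assumption
        · simp only [String.toList_ofList, List.length_drop]; omega
        · simp only [String.toList_ofList, List.length_drop]; omega
      simp only [List.map_cons, canSpellAltLoop, canSpellLoop, hcond.mpr hc, if_pos hc,
        harg, hget, hfuel]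
      split_ifs with h <;> simp [ih (fun t ht => hl t (List.mem_cons_of_mem _ ht))]
    · have hc' := hcond.not.mpr hc
      simp only [List.map_cons, canSpellAltLoop, canSpellLoop, if_neg hc, if_neg hc']
      exact ih (fun t ht => hl t (List.mem_cons_of_mem _ ht))

theorem getD_set!_ne {α : Type} (a : Array α) (k m : Nat) (v d : α) (hne : m ≠ k) :
    (a.set! k v).getD m d = a.getD m d := by
  simp [Array.getD_eq_getD_getElem?, Array.set!, hne.symm]

theorem getD_set!_self {α : Type} (a : Array α) (k : Nat) (v d : α) (hk : k < a.size) :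
    (a.set! k v).getD k d = v := by
  simp [Array.getD_eq_getD_getElem?, Array.set!, hk]

theorem getD_irrel {α : Type} (a : Array α) (m : Nat) (d d' : α) (hm : m < a.size) :
    a.getD m d = a.getD m d' := by
  simp [Array.getD_eq_getD_getElem?, Array.getElem?_eq_getElem hm]

theorem lower_ofList_of_lowered (u : List Char) (h : PySem.Chars.lower u = u) :
    PySem.Str.lower (String.ofList u) = String.ofList u := by
  rw [← String.toList_inj]
  simp [PySem.Str.toList_lower, h]

theorem canSpellFuel_succ (f : Nat) (word : String) (symbols : List String) :
    canSpellFuel (f+1) word symbols =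
      (if PySem.Str.lower word = "" then (true, "")
       else canSpellLoop (fun suf => canSpellFuel f suf symbols) (PySem.Str.lower word) symbols) := rfl

theorem suffVal_unfold (wl : List Char) (symbols : List String) (k : Nat)
    (hlow : PySem.Chars.lower wl = wl) (hk : k < wl.length) :
    suffVal wl symbols k
      = canSpellLoop (fun suf => canSpellFuel (wl.length - k) suf symbols)
          (String.ofList (wl.drop k)) symbols := by
  have hlowd : PySem.Chars.lower (wl.drop k) = wl.drop k := by
    have : PySem.Chars.lower (wl.drop k) = (PySem.Chars.lower wl).drop k := by
      simp [PySem.Chars.lower, List.map_drop]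
    rw [this, hlow]
  have hne : String.ofList (wl.drop k) ≠ "" := by
    intro h
    have : (String.ofList (wl.drop k)).toList = [] := by rw [h]; rfl
    simp only [String.toList_ofList, List.drop_eq_nil_iff] at this
    omega
  have hn : wl.length - k + 1 = (wl.length - k - 1) + 1 + 1 := by omega
  unfold suffVal
  rw [hn, canSpellFuel_succ]
  rw [lower_ofList_of_lowered _ hlowd, if_neg hne]
  rw [show wl.length - k - 1 + 1 = wl.length - k from by omega]

theorem fold_inv (wl : List Char) (symbols : List String)
    (hlow : PySem.Chars.lower wl = wl) (hsym : ∀ s ∈ symbols, s ≠ "") :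
    ∀ (k : Nat) (a : Array (Bool × String)), k ≤ wl.length → a.size = wl.length + 1 →
    (∀ m, k ≤ m → m ≤ wl.length → a.getD m (false, "") = suffVal wl symbols m) →
    (((List.range k).reverse).foldl
        (fun a i => a.set! i (canSpellAltLoop (String.ofList wl) a i
          (symbols.map (fun s => (s, PySem.Str.lower s))))) a).size = wl.length + 1 ∧
    ∀ m, m ≤ wl.length →
      (((List.range k).reverse).foldl
        (fun a i => a.set! i (canSpellAltLoop (String.ofList wl) a i
          (symbols.map (fun s => (s, PySem.Str.lower s))))) a).getD m (false, "")
      = suffVal wl symbols m := by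
  intro k
  induction k with
  | zero =>
    intro a _ hsz hinv
    simp only [List.range_zero, List.reverse_nil, List.foldl_nil]
    exact ⟨hsz, fun m hm => hinv m (Nat.zero_le m) hm⟩
  | succ k ih =>
    intro a hk hsz hinv
    rw [List.range_succ, List.reverse_append]
    simp only [List.reverse_cons, List.reverse_nil, List.nil_append, List.cons_append,
      List.foldl_cons]
    set v := canSpellAltLoop (String.ofList wl) a k (symbols.map (fun s => (s, PySem.Str.lower s))) with hv
    have hkn : k < wl.length := by omega
    have hvval : v = suffVal wl symbols k := by
      rw [hv, loops_agree wl symbols a k hkn hsym (fun m hm hm2 => hinv m (by omega) hm2) symbols hsym]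
      rw [suffVal_unfold wl symbols k hlow hkn]
    apply ih (a.set! k v)
    · omega
    · simp [hsz]
    · intro m hm hm2
      by_cases hmk : m = k
      · subst hmk
        rw [getD_set!_self _ _ _ _ (by omega), hvval]
      · rw [getD_set!_ne _ _ _ _ _ hmk]
        exact hinv m (by omega) hm2

theorem main_eq (word : String) (symbols : List String)
    (hsym : ∀ s ∈ symbols, s ≠ "") : can_spell word symbols = can_spell_alt word symbols := by
  set wl := (PySem.Str.lower word).toList with hwl
  have hwl' : wl = PySem.Chars.lower word.toList := by rw [hwl, PySem.Str.toList_lower]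
  have hlow : PySem.Chars.lower wl = wl := by rw [hwl']; exact chars_lower_idem _
  have hlen : wl.length = word.toList.length := by rw [hwl]; exact length_lower word
  have hA : can_spell word symbols = suffVal wl symbols 0 := by
    unfold can_spell suffVal
    rw [List.drop_zero, Nat.sub_zero, ← hlen]
    apply fuel_congr_lower
    rw [← String.toList_inj, PySem.Str.toList_lower, PySem.Str.toList_lower, String.toList_ofList,
      hlow, hwl']
  have hfilter : symbols.filter (fun s => s ≠ "") = symbols :=
    List.filter_eq_self.mpr (fun s hs => by simpa using hsym s hs)
  have hofl : String.ofList wl = PySem.Str.lower word := by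
    rw [← String.toList_inj, String.toList_ofList]
  have hinit : ∀ m, wl.length ≤ m → m ≤ wl.length →
      (Array.replicate (wl.length+1) ((true : Bool), "")).getD m (false, "") = suffVal wl symbols m := by
    intro m h1 h2
    have hm : m = wl.length := by omega
    subst hm
    have hrep : (Array.replicate (wl.length+1) ((true : Bool), "")).getD wl.length (false, "")
        = ((true : Bool), "") := by
      simp [Array.getD_eq_getD_getElem?, Array.getElem?_replicate]
    rw [hrep]
    unfold suffVal
    rw [Nat.sub_self, List.drop_length]
    rw [show (0:Nat) + 1 = 0 + 1 from rfl, canSpellFuel_succ]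
    have hemp : PySem.Str.lower (String.ofList []) = "" := by
      rw [← String.toList_inj]
      simp [PySem.Str.toList_lower, PySem.Chars.lower]
    rw [hemp, if_pos rfl]
  have hfold := fold_inv wl symbols hlow hsym wl.length
      (Array.replicate (wl.length+1) (true, "")) le_rfl (by simp) hinit
  have hB : can_spell_alt word symbols = suffVal wl symbols 0 := by
    have h1 : can_spell_alt word symbols =
        (((List.range ((PySem.Str.lower word).toList.length)).reverse).foldl
          (fun a i => a.set! i (canSpellAltLoop (PySem.Str.lower word) a i
            ((symbols.filter (fun s => s ≠ "")).map (fun s => (s, PySem.Str.lower s)))))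
          (Array.replicate ((PySem.Str.lower word).toList.length + 1) (true, ""))).getD 0 (true, "") := rfl
    rw [h1, hfilter, ← hofl]
    simp only [String.toList_ofList]
    rw [getD_irrel _ 0 (true, "") (false, "") (by rw [hfold.1]; omega)]
    exact hfold.2 0 (Nat.zero_le _)
  rw [hA, hB]

theorem main_eq_empty (symbols : List String) : can_spell "" symbols = can_spell_alt "" symbols := by
  have l0 : PySem.Str.lower "" = "" := by
    rw [← String.toList_inj]; simp [PySem.Str.toList_lower, PySem.Chars.lower]
  have hA : can_spell "" symbols = (true, "") := by
    unfold can_spell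
    rw [show ("" : String).toList.length + 1 = 0 + 1 by simp, canSpellFuel_succ, l0, if_pos rfl]
  have hB : can_spell_alt "" symbols = (true, "") := by
    have h1 : can_spell_alt "" symbols =
        (((List.range ((PySem.Str.lower "").toList.length)).reverse).foldl
          (fun a i => a.set! i (canSpellAltLoop (PySem.Str.lower "") a i
            ((symbols.filter (fun s => s ≠ "")).map (fun s => (s, PySem.Str.lower s)))))
          (Array.replicate ((PySem.Str.lower "").toList.length + 1) (true, ""))).getD 0 (true, "") := rfl
    rw [h1, l0]
    simp [Array.getD_eq_getD_getElem?]
  rw [hA, hB]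

-- ===== VERDICT (by name: the statement is the Claim_ definition above) =====
theorem can_spell_spec : Claim_equal_can_spell := by
  intro word symbols _ hpre
  unfold Spec_can_spell
  rcases hpre with hw | hpre
  · subst hw; exact main_eq_empty symbols
  · exact main_eq word symbols (fun s hs h => hpre (h ▸ hs))
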